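-- pv_equiv track=rewrite | github.com/katchinsky/reflux-tg-bot | scripts/analyze_taxonomy.py | compute_levels_shortest_path
-- ===== SOURCE A (Python) =====
-- from collections import Counter, defaultdict, deque
-- from typing import Any, DefaultDict, Dict, Iterable, List, Optional, Set, Tuple
--
-- def compute_levels_shortest_path(
--     roots: Set[str], child_map: Dict[str, Set[str]]
-- ) -> Dict[str, int]:
--     """
--     Breadth-first search from all roots to compute minimum distance (level).
--     Roots are assigned level 0.
--     """
--     level: Dict[str, int] = {}
--     q: deque[str] = deque()
--
--     for r in roots:
--         level[r] = 0
--         q.append(r)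
--
--     while q:
--         u = q.popleft()
--         base = level[u]
--         for v in child_map.get(u, ()):
--             cand = base + 1
--             prev = level.get(v)
--             if prev is None or cand < prev:
--                 level[v] = cand
--                 q.append(v)
--
--     return level
-- ===== SOURCE B (Python) =====
-- def compute_levels_shortest_path(roots, child_map):
--     """Layered BFS that records (node, depth) pairs in discovery order and
--     builds the dict once at the end; no level dict is consulted during the
--     traversal, only a seen-set."""
--     pairs = [(r, 0) for r in roots]
--     seen = set(roots)
--     frontier = list(roots)
--     depth = 1
--     while frontier:
--         nxt = []
--         for u in frontier:
--             for v in child_map.get(u, ()):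
--                 if v not in seen:
--                     seen.add(v)
--                     nxt.append(v)
--                     pairs.append((v, depth))
--         frontier = nxt
--         depth += 1
--     return dict(pairs)
-- ===== Notes on version B (the rewrite author's own statement) =====
-- stated objective: alternative
-- what changed: A runs a deque BFS that maintains the level dict itself, dequeuing one node at a time and relaxing with 'prev is None or cand < prev'; B never touches a dict during traversal: it runs a layer-synchronous BFS over a seen-set, appending (node, depth) pairs in discovery order, and builds the dict once from the pair list at the end (the relaxation provably never fires, so the results coincide exactly).
import Mathlib
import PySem

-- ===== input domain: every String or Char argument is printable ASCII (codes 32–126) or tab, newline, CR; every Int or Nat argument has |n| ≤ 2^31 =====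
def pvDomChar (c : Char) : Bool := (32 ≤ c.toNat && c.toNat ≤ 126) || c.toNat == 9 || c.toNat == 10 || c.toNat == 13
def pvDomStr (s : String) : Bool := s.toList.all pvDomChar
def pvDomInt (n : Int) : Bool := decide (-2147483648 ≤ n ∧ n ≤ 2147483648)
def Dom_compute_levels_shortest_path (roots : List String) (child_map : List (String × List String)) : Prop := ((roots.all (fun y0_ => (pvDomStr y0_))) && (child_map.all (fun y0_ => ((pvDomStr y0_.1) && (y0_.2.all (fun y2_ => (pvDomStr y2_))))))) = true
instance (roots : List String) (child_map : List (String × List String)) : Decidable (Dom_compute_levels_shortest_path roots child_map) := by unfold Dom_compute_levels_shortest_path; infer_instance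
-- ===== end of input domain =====

-- B replaces A's deque BFS that maintains the level dict (popleft + relaxation test
-- `prev is None or cand < prev`) by a layer-synchronous BFS over a seen-SET that records
-- (node, depth) pairs and builds the dict once at the end; objective: alternative.

-- shared accessor: child_map.get(u, ()) — first-match association-list lookup
def pvChildren (cm : List (String × List String)) (u : String) : List String :=
  (cm.lookup u).getD []

-- ===== PORT A =====
-- body of A's inner `for v in child_map.get(u, ())` loop: state = (level, queue)
def pvAStep (base : Int) (st : PySem.Dict String Int × List String) (v : String) :
    PySem.Dict String Int × List String :=
  match st.1.get? v with
  | none => (st.1.insert v (base + 1), st.2 ++ [v])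
  | some prev => if base + 1 < prev then (st.1.insert v (base + 1), st.2 ++ [v]) else st

-- A's `while q` loop, fuel-driven; the fuel chosen below is proved sufficient, so the
-- fuel-exhaustion and missing-key branches are unreachable (Python's loop always terminates here
-- and `level[u]` never raises)
def pvALoop (cm : List (String × List String)) :
    Nat → PySem.Dict String Int → List String → PySem.Dict String Int
  | _, level, [] => level
  | 0, level, _ :: _ => level
  | fuel+1, level, u :: q =>
    match level.get? u with
    | none => level   -- unreachable: every enqueued node has a level
    | some base =>
      let st := (pvChildren cm u).foldl (pvAStep base) (level, q)
      pvALoop cm fuel st.1 st.2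

def pvFuel (roots : List String) (cm : List (String × List String)) : Nat :=
  roots.length + (cm.map (fun p => p.2.length)).sum + 1

def compute_levels_shortest_path (roots : List String) (child_map : List (String × List String)) :
    List (String × Int) :=
  let seed := roots.foldl
    (fun (st : PySem.Dict String Int × List String) r => (st.1.insert r 0, st.2 ++ [r]))
    (PySem.Dict.empty, [])
  (pvALoop child_map (pvFuel roots child_map) seed.1 seed.2).items

-- ===== PORT B =====
-- body of B's inner loop (`if v not in seen`): state = (seen, nxt, pairs)
def pvBStep (depth : Int)
    (st : PySem.Set String × List String × List (String × Int)) (v : String) :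
    PySem.Set String × List String × List (String × Int) :=
  if PySem.Set.contains st.1 v then st
  else (PySem.Set.add st.1 v, st.2.1 ++ [v], st.2.2 ++ [(v, depth)])

-- B's outer `while frontier` loop: one recursive call per layer (same fuel, proved sufficient);
-- carries only the seen-set, the frontier and the flat pair list
def pvBLoop (cm : List (String × List String)) :
    Nat → PySem.Set String → List String → List (String × Int) → Int → List (String × Int)
  | _, _, [], pairs, _ => pairs
  | 0, _, _ :: _, pairs, _ => pairs
  | fuel+1, seen, frontier, pairs, depth =>
    let st := frontier.foldl
      (fun st u => (pvChildren cm u).foldl (pvBStep depth) st)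
      (seen, ([] : List String), pairs)
    pvBLoop cm fuel st.1 st.2.1 st.2.2 (depth + 1)

-- dict(pairs)
def pvBuild (pairs : List (String × Int)) : PySem.Dict String Int :=
  pairs.foldl (fun d kv => d.insert kv.1 kv.2) PySem.Dict.empty

def compute_levels_shortest_path_alt (roots : List String) (child_map : List (String × List String)) :
    List (String × Int) :=
  (pvBuild (pvBLoop child_map (pvFuel roots child_map)
      (PySem.Set.ofList roots) roots (roots.map (fun r => (r, (0 : Int)))) 1)).items

-- ===== PRECONDITION & SPEC =====
def Spec_compute_levels_shortest_path (roots : List String) (child_map : List (String × List String)) (out : List (String × Int)) : Prop := out = compute_levels_shortest_path_alt roots child_map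
instance (roots : List String) (child_map : List (String × List String)) (out : List (String × Int)) : Decidable (Spec_compute_levels_shortest_path roots child_map out) := by unfold Spec_compute_levels_shortest_path; infer_instance

-- ===== CLAIM (what is proved, stated in full; the proofs are below) =====
def Claim_equal_compute_levels_shortest_path : Prop := ∀ (roots : List String) (child_map : List (String × List String)), Dom_compute_levels_shortest_path roots child_map → Spec_compute_levels_shortest_path roots child_map (compute_levels_shortest_path roots child_map)

-- ===== LEMMAS AND PROOFS =====

-- universe of all nodes that can ever be newly discovered by the loops, and the potential: how
-- many of them A's dict does not yet contain (each enqueue/append consumes exactly one unit)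
def pvUniv (cm : List (String × List String)) : List String :=
  (cm.flatMap (fun p => p.2)).dedup

def pvPot (cm : List (String × List String)) (lv : PySem.Dict String Int) : Nat :=
  ((pvUniv cm).filter (fun v => !lv.contains v)).length

lemma pvChildren_subset (cm : List (String × List String)) (u v : String)
    (h : v ∈ pvChildren cm u) : v ∈ pvUniv cm := by
  unfold pvChildren at h
  unfold pvUniv
  rw [List.mem_dedup]
  induction cm with
  | nil => simp [List.lookup] at h
  | cons p t ih =>
    rw [List.flatMap_cons]
    rcases p with ⟨a, l⟩
    by_cases hau : u == a
    · simp only [List.lookup, hau] at h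
      exact List.mem_append_left _ h
    · simp only [List.lookup, show (u == a) = false from by simpa using hau] at h
      exact List.mem_append_right _ (ih h)

-- filtering a nodup list after flipping the predicate at one member drops exactly that member
lemma pvFilterLen {α : Type} [DecidableEq α] (p q : α → Bool) (v : α) :
    ∀ (U : List α), U.Nodup → v ∈ U → p v = true → q v = false →
    (∀ x, x ≠ v → q x = p x) →
    (U.filter q).length + 1 = (U.filter p).length := by
  intro U
  induction U with
  | nil => simp
  | cons a t ih =>
    intro hnd hv hp hq hpq
    rcases List.mem_cons.mp hv with rfl | hvt
    · rw [List.filter_cons, List.filter_cons, hp, hq]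
      have : t.filter q = t.filter p := by
        apply List.filter_congr
        intro x hx
        exact hpq x (fun hxv => (List.nodup_cons.mp hnd).1 (hxv ▸ hx))
      simp [this]
    · have hav : a ≠ v := fun hav => (List.nodup_cons.mp hnd).1 (hav ▸ hvt)
      rw [List.filter_cons, List.filter_cons, hpq a hav]
      have := ih (List.nodup_cons.mp hnd).2 hvt hp hq hpq
      split_ifs
      · simp only [List.length_cons]; omega
      · omega

lemma pvPot_insert (cm : List (String × List String)) (lv : PySem.Dict String Int)
    (v : String) (c : Int) (hv : v ∈ pvUniv cm) (hc : lv.contains v = false) :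
    pvPot cm (lv.insert v c) + 1 = pvPot cm lv := by
  unfold pvPot
  apply pvFilterLen (fun x => !lv.contains x) (fun x => !(lv.insert v c).contains x) v
    (pvUniv cm) (List.nodup_dedup _) hv
  · simp [hc]
  · simp [PySem.Dict.contains_insert_self]
  · intro x hx
    simp [PySem.Dict.contains_insert, hx]

-- the combined inner-fold lemma: under the state correspondence
--   lv = dict(pairs),  seen ~ keys(lv),  all levels ≤ d+1,  q2-members at level d+1,
-- one pass of A's relaxation fold over `children` IS one pass of B's seen-set fold
-- (A's guard `cand < prev` never fires), and the correspondence plus the fuel potential persist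
lemma pvFoldAB (cm : List (String × List String)) (d : Int) :
    ∀ (children : List String) (lv : PySem.Dict String Int) (seen : PySem.Set String)
      (q1 q2 : List String) (pairs : List (String × Int)),
    lv = pvBuild pairs →
    (∀ x, PySem.Set.contains seen x = lv.contains x) →
    (∀ k v, lv.get? k = some v → v ≤ d + 1) →
    (∀ u ∈ q2, lv.get? u = some (d + 1)) →
    (∀ v ∈ children, v ∈ pvUniv cm) →
    children.foldl (pvAStep d) (lv, q1 ++ q2) =
      (pvBuild (children.foldl (pvBStep (d+1)) (seen, q2, pairs)).2.2,
       q1 ++ (children.foldl (pvBStep (d+1)) (seen, q2, pairs)).2.1) ∧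
    (∀ x, PySem.Set.contains (children.foldl (pvBStep (d+1)) (seen, q2, pairs)).1 x
        = (pvBuild (children.foldl (pvBStep (d+1)) (seen, q2, pairs)).2.2).contains x) ∧
    (∀ k v, lv.get? k = some v →
        (pvBuild (children.foldl (pvBStep (d+1)) (seen, q2, pairs)).2.2).get? k = some v) ∧
    (∀ k v, (pvBuild (children.foldl (pvBStep (d+1)) (seen, q2, pairs)).2.2).get? k = some v →
        v ≤ d + 1) ∧
    (∀ u ∈ (children.foldl (pvBStep (d+1)) (seen, q2, pairs)).2.1,
        (pvBuild (children.foldl (pvBStep (d+1)) (seen, q2, pairs)).2.2).get? u = some (d + 1)) ∧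
    ((children.foldl (pvBStep (d+1)) (seen, q2, pairs)).2.1.length +
        pvPot cm (pvBuild (children.foldl (pvBStep (d+1)) (seen, q2, pairs)).2.2)
      = q2.length + pvPot cm lv) := by
  intro children
  induction children with
  | nil =>
    intro lv seen q1 q2 pairs hlv hcorr hb hq2 _
    subst hlv
    exact ⟨rfl, hcorr, fun k v h => h, hb, hq2, rfl⟩
  | cons c t ih =>
    intro lv seen q1 q2 pairs hlv hcorr hb hq2 hu
    simp only [List.foldl_cons]
    cases hg : lv.get? c with
    | some prev =>
      have hct : lv.contains c = true := by
        rw [PySem.Dict.contains_eq_isSome_get?, hg]; rfl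
      have ha : pvAStep d (lv, q1 ++ q2) c = (lv, q1 ++ q2) := by
        simp only [pvAStep, hg]
        rw [if_neg (by have := hb c prev hg; omega)]
      have hbs : pvBStep (d+1) (seen, q2, pairs) c = (seen, q2, pairs) := by
        have hsc : c ∈ seen := (PySem.Set.contains_iff seen c).1 (by rw [hcorr c]; exact hct)
        simp [pvBStep, hsc]
      rw [ha, hbs]
      exact ih lv seen q1 q2 pairs hlv hcorr hb hq2
        (fun v hv => hu v (List.mem_cons_of_mem _ hv))
    | none =>
      have hcf : lv.contains c = false := by
        rw [PySem.Dict.contains_eq_isSome_get?, hg]; rfl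
      have hnm : c ∉ seen := by
        intro hmem
        have hcc := hcorr c
        rw [(PySem.Set.contains_iff seen c).2 hmem, hcf] at hcc
        exact absurd hcc (by simp)
      have ha : pvAStep d (lv, q1 ++ q2) c = (lv.insert c (d+1), q1 ++ (q2 ++ [c])) := by
        simp [pvAStep, hg, List.append_assoc]
      have hbs : pvBStep (d+1) (seen, q2, pairs) c
          = (PySem.Set.add seen c, q2 ++ [c], pairs ++ [(c, d+1)]) := by
        simp [pvBStep, hnm]
      rw [ha, hbs]
      have hbuild : lv.insert c (d+1) = pvBuild (pairs ++ [(c, d+1)]) := by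
        rw [hlv]; unfold pvBuild; rw [List.foldl_append]; rfl
      have hcorr' : ∀ x, PySem.Set.contains (PySem.Set.add seen c) x
          = (lv.insert c (d+1)).contains x := by
        intro x
        rw [PySem.Set.add_of_not_mem hnm, PySem.Dict.contains_insert, ← hcorr x]
        by_cases hx : x = c
        · simp [hx]
        · simp [hx]
      have hmono : ∀ k v, lv.get? k = some v → (lv.insert c (d+1)).get? k = some v := by
        intro k v hk
        rw [PySem.Dict.get?_insert]
        split_ifs with hkc
        · rw [hkc, hg] at hk; exact absurd hk (by simp)
        · exact hk
      have hb' : ∀ k v, (lv.insert c (d+1)).get? k = some v → v ≤ d + 1 := by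
        intro k v hk
        rw [PySem.Dict.get?_insert] at hk
        split_ifs at hk with hkc
        · simp only [Option.some.injEq] at hk; omega
        · exact hb k v hk
      have hq2' : ∀ u ∈ q2 ++ [c], (lv.insert c (d+1)).get? u = some (d+1) := by
        intro u hu'
        rcases List.mem_append.mp hu' with h1 | h1
        · exact hmono u _ (hq2 u h1)
        · simp only [List.mem_singleton] at h1
          rw [h1]; exact PySem.Dict.get?_insert_self lv c (d+1)
      have hlv' : lv.insert c (d+1) = pvBuild (pairs ++ [(c, d+1)]) := hbuild
      obtain ⟨i0, i1, i2, i3, i4, i5⟩ := ih (lv.insert c (d+1)) (PySem.Set.add seen c)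
        q1 (q2 ++ [c]) (pairs ++ [(c, d+1)]) hlv'
        (by rw [PySem.Set.add_of_not_mem hnm] at hcorr' ⊢; exact hcorr')
        hb' hq2' (fun v hv => hu v (List.mem_cons_of_mem _ hv))
      refine ⟨i0, i1, fun k v hk => i2 k v (hmono k v hk), i3, i4, ?_⟩
      have hp := pvPot_insert cm lv c (d+1) (hu c List.mem_cons_self) hcf
      simp only [List.length_append, List.length_singleton] at i5
      omega

lemma pvALoop_nil (cm : List (String × List String)) (fa : Nat) (lv : PySem.Dict String Int) :
    pvALoop cm fa lv [] = lv := by cases fa <;> rfl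

lemma pvBLoop_nil (cm : List (String × List String)) (fb : Nat) (seen : PySem.Set String)
    (pairs : List (String × Int)) (d : Int) :
    pvBLoop cm fb seen [] pairs d = pairs := by cases fb <;> rfl

-- the bisimulation: A's queue is always rest-of-current-layer ++ next-layer-so-far, A's dict is
-- always dict(B's pairs), and processing one dequeued node of A is one inner-fold step of B
lemma pvBisim (cm : List (String × List String)) :
    ∀ (n fa fb : Nat) (lv : PySem.Dict String Int) (seen : PySem.Set String)
      (q1 q2 : List String) (pairs : List (String × Int)) (d : Int),
    fa + fb ≤ n →
    lv = pvBuild pairs →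
    (∀ x, PySem.Set.contains seen x = lv.contains x) →
    (∀ k v, lv.get? k = some v → v ≤ d + 1) →
    (∀ u ∈ q1, lv.get? u = some d) →
    (∀ u ∈ q2, lv.get? u = some (d + 1)) →
    q1.length + q2.length + pvPot cm lv ≤ fa →
    1 + q2.length + pvPot cm lv ≤ fb →
    pvALoop cm fa lv (q1 ++ q2) =
      pvBuild (pvBLoop cm (fb - 1)
        (q1.foldl (fun st u => (pvChildren cm u).foldl (pvBStep (d+1)) st) (seen, q2, pairs)).1
        (q1.foldl (fun st u => (pvChildren cm u).foldl (pvBStep (d+1)) st) (seen, q2, pairs)).2.1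
        (q1.foldl (fun st u => (pvChildren cm u).foldl (pvBStep (d+1)) st) (seen, q2, pairs)).2.2
        (d + 2)) := by
  intro n
  induction n with
  | zero =>
    intro fa fb lv seen q1 q2 pairs d hn _ _ _ _ _ _ hfb
    omega
  | succ n ihn =>
    intro fa fb lv seen q1 q2 pairs d hn hlv hcorr hb hq1 hq2 hfa hfb
    cases q1 with
    | cons u q1' =>
      obtain ⟨f, rfl⟩ : ∃ f, fa = f + 1 := ⟨fa - 1, by simp at hfa ⊢; omega⟩
      have hu : lv.get? u = some d := hq1 u List.mem_cons_self
      have hstep : pvALoop cm (f+1) lv ((u :: q1') ++ q2) =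
          pvALoop cm f ((pvChildren cm u).foldl (pvAStep d) (lv, q1' ++ q2)).1
            ((pvChildren cm u).foldl (pvAStep d) (lv, q1' ++ q2)).2 := by
        simp only [List.cons_append, pvALoop, hu]
      obtain ⟨i0, i1, i2, i3, i4, i5⟩ := pvFoldAB cm d (pvChildren cm u) lv seen q1' q2 pairs
        hlv hcorr hb hq2 (fun v hv => pvChildren_subset cm u v hv)
      rw [hstep, i0]
      have ihres := ihn f fb
        (pvBuild ((pvChildren cm u).foldl (pvBStep (d+1)) (seen, q2, pairs)).2.2)
        ((pvChildren cm u).foldl (pvBStep (d+1)) (seen, q2, pairs)).1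
        q1'
        ((pvChildren cm u).foldl (pvBStep (d+1)) (seen, q2, pairs)).2.1
        ((pvChildren cm u).foldl (pvBStep (d+1)) (seen, q2, pairs)).2.2
        d (by omega) rfl i1 i3
        (fun x hx => i2 x d (hq1 x (List.mem_cons_of_mem _ hx))) i4
        (by
          have hple : pvPot cm (pvBuild ((pvChildren cm u).foldl (pvBStep (d+1)) (seen, q2, pairs)).2.2)
              ≤ q2.length + pvPot cm lv := by omega
          simp at hfa; omega)
        (by omega)
      rw [ihres]
      simp only [List.foldl_cons]
    | nil =>
      simp only [List.nil_append, List.foldl_nil]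
      cases q2 with
      | nil => rw [pvALoop_nil, pvBLoop_nil, hlv]
      | cons v q2' =>
        obtain ⟨g, hg⟩ : ∃ g, fb - 1 = g + 1 := ⟨fb - 2, by simp at hfb; omega⟩
        rw [hg]
        have hstep : pvBLoop cm (g+1) seen (v :: q2') pairs (d+2) =
            pvBLoop cm g
              ((v :: q2').foldl (fun st u => (pvChildren cm u).foldl (pvBStep (d+2)) st)
                (seen, ([] : List String), pairs)).1
              ((v :: q2').foldl (fun st u => (pvChildren cm u).foldl (pvBStep (d+2)) st)
                (seen, ([] : List String), pairs)).2.1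
              ((v :: q2').foldl (fun st u => (pvChildren cm u).foldl (pvBStep (d+2)) st)
                (seen, ([] : List String), pairs)).2.2
              (d + 2 + 1) := by
          simp only [pvBLoop]
        rw [hstep]
        have ihres := ihn fa (fb - 1) lv seen (v :: q2') [] pairs (d+1) (by omega) hlv hcorr
          (fun k w hk => by have := hb k w hk; omega) hq2 (by simp)
          (by simp at hfa ⊢; omega) (by simp at hfb ⊢; omega)
        simp only [List.append_nil] at ihres
        rw [show d + 1 + 1 = d + 2 from by ring, show d + 1 + 2 = d + 2 + 1 from by ring,
          show fb - 1 - 1 = g from by omega] at ihres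
        rw [ihres]

lemma pvPot_le (cm : List (String × List String)) (lv : PySem.Dict String Int) :
    pvPot cm lv ≤ (cm.map (fun p => p.2.length)).sum := by
  calc pvPot cm lv ≤ (pvUniv cm).length := List.length_filter_le _ _
  _ ≤ (cm.flatMap (fun p => p.2)).length := (List.dedup_sublist _).length_le
  _ = (cm.map (fun p => p.2.length)).sum := by
      rw [List.length_flatMap]

-- A's root-seeding loop produces exactly (dict(B's initial pairs), roots)
lemma pvSeedA :
    ∀ (roots : List String) (dq : PySem.Dict String Int × List String),
    roots.foldl (fun (st : PySem.Dict String Int × List String) r => (st.1.insert r 0, st.2 ++ [r])) dq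
      = (roots.foldl (fun d r => d.insert r 0) dq.1, dq.2 ++ roots) := by
  intro roots
  induction roots with
  | nil => intro dq; simp
  | cons r t ih =>
    intro dq
    simp only [List.foldl_cons]
    rw [ih (dq.1.insert r 0, dq.2 ++ [r])]
    simp [List.append_assoc]

-- every value stored by the seeding fold is 0
lemma pvSeedVal :
    ∀ (roots : List String) (d : PySem.Dict String Int),
    (∀ k v, d.get? k = some v → v = 0) →
    (∀ k v, (roots.foldl (fun d r => d.insert r 0) d).get? k = some v → v = 0) := by
  intro roots
  induction roots with
  | nil => intro d h; exact h
  | cons r t ih =>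
    intro d h
    simp only [List.foldl_cons]
    apply ih
    intro k v hk
    rw [PySem.Dict.get?_insert] at hk
    split_ifs at hk with hkr
    · exact (Option.some.inj hk).symm
    · exact h k v hk

lemma main_core (roots : List String) (cm : List (String × List String)) :
    (pvALoop cm (pvFuel roots cm)
      (roots.foldl (fun (st : PySem.Dict String Int × List String) r => (st.1.insert r 0, st.2 ++ [r])) (PySem.Dict.empty, [])).1
      (roots.foldl (fun (st : PySem.Dict String Int × List String) r => (st.1.insert r 0, st.2 ++ [r])) (PySem.Dict.empty, [])).2)
    = pvBuild (pvBLoop cm (pvFuel roots cm)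
        (PySem.Set.ofList roots) roots (roots.map (fun r => (r, (0 : Int)))) 1) := by
  rw [pvSeedA roots (PySem.Dict.empty, [])]
  simp only [List.nil_append]
  have hlv0 : roots.foldl (fun (d : PySem.Dict String Int) r => d.insert r 0) PySem.Dict.empty
      = pvBuild (roots.map (fun r => (r, (0 : Int)))) := by
    unfold pvBuild
    rw [List.foldl_map]
  set lv0 : PySem.Dict String Int :=
    roots.foldl (fun (d : PySem.Dict String Int) r => d.insert r 0) PySem.Dict.empty with hlv0def
  have hval : ∀ k v, lv0.get? k = some v → v = 0 :=
    pvSeedVal roots PySem.Dict.empty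
      (fun k v hk => by rw [PySem.Dict.get?_empty] at hk; exact absurd hk (by simp))
  have hkeys : lv0.keys = PySem.Set.ofList roots := by
    rw [hlv0def, PySem.Dict.keys_foldl_insert]
    simp [PySem.Set.update_nil_left]
  have hcorr : ∀ x, PySem.Set.contains (PySem.Set.ofList roots) x = lv0.contains x := by
    intro x
    rw [Bool.eq_iff_iff, PySem.Set.contains_iff]
    constructor
    · intro h
      exact (PySem.Dict.contains_iff_mem_keys lv0 x).2 (hkeys ▸ h)
    · intro h
      exact hkeys ▸ (PySem.Dict.contains_iff_mem_keys lv0 x).1 h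
  have hroots0 : ∀ r ∈ roots, lv0.get? r = some 0 := by
    intro r hr
    have hct : lv0.contains r = true := by
      rw [← hcorr r, PySem.Set.contains_iff, PySem.Set.mem_ofList]
      exact hr
    rw [PySem.Dict.contains_eq_isSome_get?] at hct
    cases hgr : lv0.get? r with
    | none => rw [hgr] at hct; exact absurd hct (by simp)
    | some v =>
      have h0 := hval r v hgr
      rw [h0]
  cases hr : roots with
  | nil =>
    subst hr
    rw [pvALoop_nil, pvBLoop_nil, hlv0]
  | cons r rs =>
    have hbound : ∀ k v, lv0.get? k = some v → v ≤ (0:Int) + 1 := by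
      intro k v hk; have := hval k v hk; omega
    have hpot := pvPot_le cm lv0
    have hbis := pvBisim cm (pvFuel roots cm + pvFuel roots cm) (pvFuel roots cm) (pvFuel roots cm)
      lv0 (PySem.Set.ofList roots) roots [] (roots.map (fun r => (r, (0 : Int)))) 0 (le_refl _)
      hlv0 hcorr hbound hroots0 (by simp)
      (by simp only [List.length_nil]; unfold pvFuel; omega)
      (by simp only [List.length_nil]; unfold pvFuel; omega)
    simp only [List.append_nil] at hbis
    rw [← hr]
    rw [hbis]
    obtain ⟨g, hgf⟩ : ∃ g, pvFuel roots cm = g + 1 := ⟨pvFuel roots cm - 1, by unfold pvFuel; omega⟩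
    have hstep : pvBLoop cm (pvFuel roots cm) (PySem.Set.ofList roots) roots
        (roots.map (fun r => (r, (0 : Int)))) 1 =
      pvBLoop cm g
        (roots.foldl (fun st u => (pvChildren cm u).foldl (pvBStep 1) st)
          (PySem.Set.ofList roots, ([] : List String), roots.map (fun r => (r, (0 : Int))))).1
        (roots.foldl (fun st u => (pvChildren cm u).foldl (pvBStep 1) st)
          (PySem.Set.ofList roots, ([] : List String), roots.map (fun r => (r, (0 : Int))))).2.1
        (roots.foldl (fun st u => (pvChildren cm u).foldl (pvBStep 1) st)
          (PySem.Set.ofList roots, ([] : List String), roots.map (fun r => (r, (0 : Int))))).2.2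
        (1 + 1) := by
      rw [hgf]
      conv_lhs => rw [hr]
      simp only [pvBLoop]
      rw [← hr]
    rw [hstep, show pvFuel roots cm - 1 = g from by omega]
    norm_num

-- ===== VERDICT (by name: the statement is the Claim_ definition above) =====
theorem compute_levels_shortest_path_spec : Claim_equal_compute_levels_shortest_path := by
  intro roots child_map _
  unfold Spec_compute_levels_shortest_path
  exact congrArg PySem.Dict.items (main_core roots child_map)
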